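-- pv_equiv track=rewrite | github.com/ralphisko/Workstation-Capacity-tool-2 | app.py | calculate_total_minutes
-- ===== SOURCE A (Python) =====
-- process_times = {
--     "NP3": {"picking": 15, "assembly": 35, "inspection": 15},
--     "C3": {"picking": 18, "assembly": 35, "inspection": 15},
--     "C4": {"picking": 18, "assembly": 35, "inspection": 15},
--     "TC-L": {"picking": 18, "assembly": 35, "inspection": 15},
--     "DP3": {"picking": 20, "assembly": 40, "inspection": 15},
--     "E410": {"picking": 15, "assembly": 35, "inspection": 15},
-- }
--
-- transformer_times = {"picking": 5, "assembly": 15, "inspection": 5}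
--
-- transformer_required = ["NP3", "DP3", "C3", "C4"]
--
-- def calculate_total_minutes(plan):
--     totals = {
--         "picking": 0,
--         "assembly": 0,
--         "inspection": 0,
--         "transformer_picking": 0,
--         "transformer_assembly": 0,
--         "transformer_inspection": 0,
--     }
--
--     for ws_type, qty in plan.items():
--         if ws_type not in process_times:
--             continue
--         ws = process_times[ws_type]
--         totals["picking"] += ws["picking"] * qty
--         totals["assembly"] += ws["assembly"] * qty
--         totals["inspection"] += ws["inspection"] * qty
--
--         if ws_type in transformer_required:
--             totals["transformer_picking"] += transformer_times["picking"] * qty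
--             totals["transformer_assembly"] += transformer_times["assembly"] * qty
--             totals["transformer_inspection"] += transformer_times["inspection"] * qty
--
--     return totals
-- ===== SOURCE B (Python) =====
-- process_times = {
--     "NP3": {"picking": 15, "assembly": 35, "inspection": 15},
--     "C3": {"picking": 18, "assembly": 35, "inspection": 15},
--     "C4": {"picking": 18, "assembly": 35, "inspection": 15},
--     "TC-L": {"picking": 18, "assembly": 35, "inspection": 15},
--     "DP3": {"picking": 20, "assembly": 40, "inspection": 15},
--     "E410": {"picking": 15, "assembly": 35, "inspection": 15},
-- }
--
-- transformer_times = {"picking": 5, "assembly": 15, "inspection": 5}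
--
-- transformer_required = ["NP3", "DP3", "C3", "C4"]
--
--
-- def calculate_total_minutes(plan):
--     def tot(key):
--         return sum(process_times[t][key] * q for t, q in plan.items()
--                    if t in process_times)
--
--     def ttot(key):
--         return sum(transformer_times[key] * q for t, q in plan.items()
--                    if t in process_times and t in transformer_required)
--
--     return {
--         "picking": tot("picking"),
--         "assembly": tot("assembly"),
--         "inspection": tot("inspection"),
--         "transformer_picking": ttot("picking"),
--         "transformer_assembly": ttot("assembly"),
--         "transformer_inspection": ttot("inspection"),
--     }
-- ===== Notes on version B (the rewrite author's own statement) =====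
-- stated objective: simpler
-- what changed: Replaced the single fused accumulating loop over six mutable dict counters with a dict literal of six independent generator-expression sums (three weighted process sums over the filtered plan, three transformer sums over the plan restricted to transformer_required types).
import Mathlib
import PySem

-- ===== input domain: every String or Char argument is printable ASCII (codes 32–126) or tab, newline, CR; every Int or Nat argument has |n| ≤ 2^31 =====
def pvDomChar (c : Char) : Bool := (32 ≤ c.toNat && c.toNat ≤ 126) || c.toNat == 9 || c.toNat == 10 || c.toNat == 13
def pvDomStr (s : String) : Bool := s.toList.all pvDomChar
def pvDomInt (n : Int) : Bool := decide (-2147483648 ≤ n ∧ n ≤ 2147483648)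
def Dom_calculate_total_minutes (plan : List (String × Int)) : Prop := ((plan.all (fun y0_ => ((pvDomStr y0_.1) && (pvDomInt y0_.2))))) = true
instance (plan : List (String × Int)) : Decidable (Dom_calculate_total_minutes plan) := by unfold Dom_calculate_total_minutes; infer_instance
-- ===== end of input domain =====

-- B replaces A's single fused accumulating loop over a six-key mutable dict by six
-- independent filtered sums (one per output key); same O(n) cost, simpler decomposition.

-- module-level constants shared by both programs
def pvProcessTimes : PySem.Dict String (PySem.Dict String Int) :=
  PySem.Dict.ofList
    [("NP3",  PySem.Dict.ofList [("picking",15),("assembly",35),("inspection",15)]),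
     ("C3",   PySem.Dict.ofList [("picking",18),("assembly",35),("inspection",15)]),
     ("C4",   PySem.Dict.ofList [("picking",18),("assembly",35),("inspection",15)]),
     ("TC-L", PySem.Dict.ofList [("picking",18),("assembly",35),("inspection",15)]),
     ("DP3",  PySem.Dict.ofList [("picking",20),("assembly",40),("inspection",15)]),
     ("E410", PySem.Dict.ofList [("picking",15),("assembly",35),("inspection",15)])]

def pvTransformerTimes : PySem.Dict String Int :=
  PySem.Dict.ofList [("picking",5),("assembly",15),("inspection",5)]

def pvTransformerRequired : List String := ["NP3", "DP3", "C3", "C4"]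

-- ===== PORT A =====
-- loop body of A's for-loop ('continue' = return totals unchanged; 'totals[k] += v' is
-- Dict.modify, exact here since every key is always present in totals)
def pvStepA (totals : PySem.Dict String Int) (wq : String × Int) : PySem.Dict String Int :=
  match pvProcessTimes.get? wq.1 with
  | none => totals
  | some ws =>
    let totals := totals.modify "picking" 0 (· + ws.getD "picking" 0 * wq.2)
    let totals := totals.modify "assembly" 0 (· + ws.getD "assembly" 0 * wq.2)
    let totals := totals.modify "inspection" 0 (· + ws.getD "inspection" 0 * wq.2)
    if pvTransformerRequired.contains wq.1 then
      let totals := totals.modify "transformer_picking" 0 (· + pvTransformerTimes.getD "picking" 0 * wq.2)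
      let totals := totals.modify "transformer_assembly" 0 (· + pvTransformerTimes.getD "assembly" 0 * wq.2)
      totals.modify "transformer_inspection" 0 (· + pvTransformerTimes.getD "inspection" 0 * wq.2)
    else totals

def calculate_total_minutes (plan : List (String × Int)) : List (String × Int) :=
  (plan.foldl pvStepA
    (PySem.Dict.ofList
      [("picking",0),("assembly",0),("inspection",0),
       ("transformer_picking",0),("transformer_assembly",0),("transformer_inspection",0)])).items

-- ===== PORT B =====
-- B's inner helper tot(key): weighted sum over plan entries whose type is in process_times
def pvTot (plan : List (String × Int)) (key : String) : Int :=
  ((plan.filter (fun wq => pvProcessTimes.contains wq.1)).map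
    (fun wq => (pvProcessTimes.getD wq.1 PySem.Dict.empty).getD key 0 * wq.2)).sum

-- B's inner helper ttot(key): transformer sum over entries also in transformer_required
def pvTtot (plan : List (String × Int)) (key : String) : Int :=
  ((plan.filter (fun wq => pvProcessTimes.contains wq.1 && pvTransformerRequired.contains wq.1)).map
    (fun wq => pvTransformerTimes.getD key 0 * wq.2)).sum

def calculate_total_minutes_alt (plan : List (String × Int)) : List (String × Int) :=
  [("picking", pvTot plan "picking"),
   ("assembly", pvTot plan "assembly"),
   ("inspection", pvTot plan "inspection"),
   ("transformer_picking", pvTtot plan "picking"),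
   ("transformer_assembly", pvTtot plan "assembly"),
   ("transformer_inspection", pvTtot plan "inspection")]

-- ===== PRECONDITION & SPEC =====
def Spec_calculate_total_minutes (plan : List (String × Int)) (out : List (String × Int)) : Prop := out = calculate_total_minutes_alt plan
instance (plan : List (String × Int)) (out : List (String × Int)) : Decidable (Spec_calculate_total_minutes plan out) := by unfold Spec_calculate_total_minutes; infer_instance

-- ===== CLAIM (what is proved, stated in full; the proofs are below) =====
def Claim_equal_calculate_total_minutes : Prop := ∀ (plan : List (String × Int)), Dom_calculate_total_minutes plan → Spec_calculate_total_minutes plan (calculate_total_minutes plan)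

-- ===== LEMMAS AND PROOFS =====

-- the six-counter totals dict as one abbreviation (proof-side only)
def mk6 (p a i tp ta ti : Int) : PySem.Dict String Int :=
  PySem.Dict.mk [("picking",p),("assembly",a),("inspection",i),
    ("transformer_picking",tp),("transformer_assembly",ta),("transformer_inspection",ti)]

-- loop invariant: folding A's body over the plan adds B's six sums to the six counters
theorem loopA (plan : List (String × Int)) : ∀ (p a i tp ta ti : Int),
    plan.foldl pvStepA (mk6 p a i tp ta ti) =
      mk6 (p + pvTot plan "picking") (a + pvTot plan "assembly") (i + pvTot plan "inspection")
          (tp + pvTtot plan "picking") (ta + pvTtot plan "assembly") (ti + pvTtot plan "inspection") := by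
  induction plan with
  | nil => intro p a i tp ta ti; simp [pvTot, pvTtot]
  | cons hd rest ih =>
    intro p a i tp ta ti
    obtain ⟨t, q⟩ := hd
    rcases h : pvProcessTimes.get? t with _ | ws
    · have hc : pvProcessTimes.contains t = false := by
        rw [← PySem.Dict.get?_eq_none_iff_contains]; exact h
      simp only [List.foldl_cons, pvStepA, h]
      rw [ih]
      simp [pvTot, pvTtot, hc]
    · have hc : pvProcessTimes.contains t = true := by
        cases hcase : pvProcessTimes.contains t
        · have h0 : pvProcessTimes.get? t = none := by
            rw [PySem.Dict.get?_eq_none_iff_contains]; exact hcase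
          rw [h0] at h; cases h
        · rfl
      have hws : pvProcessTimes.getD t PySem.Dict.empty = ws :=
        PySem.Dict.getD_of_get?_eq_some pvProcessTimes PySem.Dict.empty h
      by_cases hr : pvTransformerRequired.contains t = true
      · have hstep : pvStepA (mk6 p a i tp ta ti) (t, q) =
            mk6 (p + ws.getD "picking" 0 * q) (a + ws.getD "assembly" 0 * q)
                (i + ws.getD "inspection" 0 * q) (tp + 5 * q) (ta + 15 * q) (ti + 5 * q) := by
          simp only [pvStepA, h, hr, if_true]
          simp [mk6, PySem.Dict.modify, PySem.Dict.insert, PySem.Dict.getD,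
                PySem.Dict.get?, pvTransformerTimes, PySem.Dict.ofList, PySem.Dict.update,
                PySem.Dict.empty]
        simp only [List.foldl_cons]
        rw [hstep, ih]
        simp only [pvTot, pvTtot, List.filter_cons, hc, hr, hws, Bool.and_self, if_pos,
          List.map_cons, List.sum_cons, mk6]
        refine congrArg PySem.Dict.mk ?_
        simp
        refine ⟨by ring, by ring, by ring, ?_, ?_, ?_⟩ <;>
          · simp [pvTransformerTimes, PySem.Dict.getD, PySem.Dict.get?, PySem.Dict.ofList,
              PySem.Dict.update, PySem.Dict.empty, PySem.Dict.insert]; ring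
      · have hr' : pvTransformerRequired.contains t = false := by
          cases hcase : pvTransformerRequired.contains t
          · rfl
          · exact absurd hcase hr
        have hstep : pvStepA (mk6 p a i tp ta ti) (t, q) =
            mk6 (p + ws.getD "picking" 0 * q) (a + ws.getD "assembly" 0 * q)
                (i + ws.getD "inspection" 0 * q) tp ta ti := by
          simp only [pvStepA, h, hr']
          simp [mk6, PySem.Dict.modify, PySem.Dict.insert, PySem.Dict.getD,
                PySem.Dict.get?]
        simp only [List.foldl_cons]
        rw [hstep, ih]
        simp only [pvTot, pvTtot, List.filter_cons, hc, hr', Bool.and_false, mk6]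
        refine congrArg PySem.Dict.mk ?_
        simp [hws]
        exact ⟨by ring, by ring, by ring⟩

-- ===== VERDICT (by name: the statement is the Claim_ definition above) =====
theorem calculate_total_minutes_spec : Claim_equal_calculate_total_minutes := by
  intro plan _
  unfold Spec_calculate_total_minutes calculate_total_minutes calculate_total_minutes_alt
  rw [show (PySem.Dict.ofList
      [("picking",(0:Int)),("assembly",0),("inspection",0),
       ("transformer_picking",0),("transformer_assembly",0),("transformer_inspection",0)]) =
      mk6 0 0 0 0 0 0 from by decide]
  rw [loopA]
  simp [mk6]
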